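-- pv_equiv track=rewrite | github.com/DT4SDG-QMUL/Distributed-Acoustic-Sensor-System-for-Intelligent-Transportation-using-Deep-Learning | utils/data_preprocessing.py | padding_symmetrically
-- ===== SOURCE A (Python) =====
-- def padding_symmetrically(i, data, start_shot, end_shot, biggest):
--     window_width = end_shot-start_shot+1
--     window = data[i][start_shot:end_shot+1]
--     output = ""
--     for s in window[:-1]:
--         output += str(s) + ' '
--     output += str(window[-1])
--
--     if window_width<biggest: #do padding if window width< biggest
--         diff = biggest - window_width
--         if diff%2 == 0:
--             padding_1 = int(diff/2)*(str(0)+ ' ')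
--             padding_2 =  (int(diff/2)-1)*(str(0)+ ' ') + str(0)
--             output = padding_1 + output + ' ' + padding_2
--         else:
--             diff = diff-1
--             padding = int(diff/2)*(str(0)+ ' ')
--             output = padding +output + ' ' + padding +str(0)
--
--     return output
-- ===== SOURCE B (Python) =====
-- def padding_symmetrically(i, data, start_shot, end_shot, biggest):
--     window = data[i][start_shot:end_shot + 1]
--     s = ' '.join(str(x) for x in window)
--     d = biggest - (end_shot - start_shot + 1)
--     # grow the padding incrementally: one zero on the right when d is odd,
--     # then a zero on each side per step, until no padding is left
--     while d > 0:
--         if d % 2: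
--             s = s + ' 0'
--             d -= 1
--         else:
--             s = '0 ' + s + ' 0'
--             d -= 2
--     return s
-- ===== Notes on version B (the rewrite author's own statement) =====
-- stated objective: alternative
-- what changed: Replaces A's parity-branch block padding (diff//2 zeros pasted left and right in one shot) by an incremental peeling loop that wraps the joined window string with one zero pair per step (right zero first when the deficit is odd), never computing diff//2 at all.
import Mathlib
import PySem

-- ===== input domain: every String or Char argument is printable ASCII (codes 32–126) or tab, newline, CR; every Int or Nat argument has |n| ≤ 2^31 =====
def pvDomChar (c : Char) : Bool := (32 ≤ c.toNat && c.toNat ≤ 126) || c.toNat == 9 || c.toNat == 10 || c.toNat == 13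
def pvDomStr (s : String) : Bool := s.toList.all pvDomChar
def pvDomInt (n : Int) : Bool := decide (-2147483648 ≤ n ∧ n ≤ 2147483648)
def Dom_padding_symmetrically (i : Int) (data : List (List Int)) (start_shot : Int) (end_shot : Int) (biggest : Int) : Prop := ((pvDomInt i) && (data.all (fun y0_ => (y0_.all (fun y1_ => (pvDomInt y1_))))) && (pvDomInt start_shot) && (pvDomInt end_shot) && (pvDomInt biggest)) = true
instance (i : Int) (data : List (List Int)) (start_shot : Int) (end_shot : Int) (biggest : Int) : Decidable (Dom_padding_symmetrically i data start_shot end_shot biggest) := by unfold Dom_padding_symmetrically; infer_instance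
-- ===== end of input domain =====

-- B replaces A's parity-branch block padding by an incremental wrapping loop that adds one
-- zero pair per step (right zero first when the deficit is odd) around the joined window.

-- ===== PORT A =====
-- Python's 'n * ("0" + " ")' (string repetition), used by A's padding branches.
def pvRep0Sp : Nat → String
  | 0 => ""
  | Nat.succ m => (PySem.Int.toStr 0 ++ " ") ++ pvRep0Sp m

def padding_symmetrically (i : Int) (data : List (List Int)) (start_shot : Int) (end_shot : Int) (biggest : Int) : String :=
  let window_width := end_shot - start_shot + 1
  -- data[i]; Pre_ guarantees the index is in range (else Python raises IndexError)
  let row := (PySem.List.pyGet? data i).getD []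
  let window := PySem.List.slice row (some start_shot) (some (end_shot + 1))
  let output := (PySem.List.slice window none (some (-1))).foldl
      (fun o s => o ++ PySem.Int.toStr s ++ " ") ""
  -- window[-1]; Pre_ guarantees the window is nonempty (else Python raises IndexError)
  let output := output ++ PySem.Int.toStr (PySem.List.pyGetD window (-1) 0)
  if window_width < biggest then
    let diff := biggest - window_width
    if PySem.Int.mod diff 2 = 0 then
      -- int(diff/2) = diff // 2 here since diff > 0
      let padding_1 := pvRep0Sp (PySem.Int.floordiv diff 2).toNat
      let padding_2 := pvRep0Sp (PySem.Int.floordiv diff 2 - 1).toNat ++ PySem.Int.toStr 0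
      padding_1 ++ output ++ " " ++ padding_2
    else
      let diff2 := diff - 1
      let padding := pvRep0Sp (PySem.Int.floordiv diff2 2).toNat
      padding ++ output ++ " " ++ padding ++ PySem.Int.toStr 0
  else output

-- ===== PORT B =====
-- B's while-loop: wrap s with one ' 0' when d is odd, else with '0 ' … ' 0', until d ≤ 0.
def pvWrap (s : String) (d : Int) : String :=
  if _h : d ≤ 0 then s
  else if PySem.Int.mod d 2 ≠ 0 then pvWrap (s ++ " 0") (d - 1)
  else pvWrap ("0 " ++ s ++ " 0") (d - 2)
termination_by d.toNat
decreasing_by all_goals omega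

def padding_symmetrically_alt (i : Int) (data : List (List Int)) (start_shot : Int) (end_shot : Int) (biggest : Int) : String :=
  let row := (PySem.List.pyGet? data i).getD []
  let window := PySem.List.slice row (some start_shot) (some (end_shot + 1))
  let s := PySem.Str.join " " (window.map PySem.Int.toStr)
  pvWrap s (biggest - (end_shot - start_shot + 1))

-- ===== PRECONDITION & SPEC =====
-- Pre_ excludes exactly the inputs where Python A raises IndexError: i out of range for data,
-- or an empty window slice (then window[-1] raises).
def Pre_padding_symmetrically (i : Int) (data : List (List Int)) (start_shot : Int) (end_shot : Int) (biggest : Int) : Prop :=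
  PySem.Raise.InRange data.length i ∧
  PySem.List.slice ((PySem.List.pyGet? data i).getD []) (some start_shot) (some (end_shot + 1)) ≠ []

instance (i : Int) (data : List (List Int)) (start_shot : Int) (end_shot : Int) (biggest : Int) : Decidable (Pre_padding_symmetrically i data start_shot end_shot biggest) := by unfold Pre_padding_symmetrically; infer_instance

def pvWitness_padding_symmetrically : Int × List (List Int) × Int × Int × Int := (0, [[1, 2, 3]], 0, 1, 5)

def Spec_padding_symmetrically (i : Int) (data : List (List Int)) (start_shot : Int) (end_shot : Int) (biggest : Int) (out : String) : Prop := out = padding_symmetrically_alt i data start_shot end_shot biggest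
instance (i : Int) (data : List (List Int)) (start_shot : Int) (end_shot : Int) (biggest : Int) (out : String) : Decidable (Spec_padding_symmetrically i data start_shot end_shot biggest out) := by unfold Spec_padding_symmetrically; infer_instance

-- ===== CLAIM (what is proved, stated in full; the proofs are below) =====
def Claim_equal_padding_symmetrically : Prop := ∀ (i : Int) (data : List (List Int)) (start_shot : Int) (end_shot : Int) (biggest : Int), Dom_padding_symmetrically i data start_shot end_shot biggest → Pre_padding_symmetrically i data start_shot end_shot biggest → Spec_padding_symmetrically i data start_shot end_shot biggest (padding_symmetrically i data start_shot end_shot biggest)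

-- ===== LEMMAS AND PROOFS =====

-- the characters of k left-padding blocks '0 ' and of m right-padding blocks ' 0'
def pvRepL : Nat → List Char
  | 0 => []
  | Nat.succ k => '0' :: ' ' :: pvRepL k

def pvRepR : Nat → List Char
  | 0 => []
  | Nat.succ m => ' ' :: '0' :: pvRepR m

theorem pvRep0Sp_toList (n : Nat) : (pvRep0Sp n).toList = pvRepL n := by
  induction n with
  | zero => rfl
  | succ n ih =>
    have h0 : PySem.Int.toChars 0 = ['0'] := by decide
    simp [pvRep0Sp, pvRepL, ih, PySem.Int.toList_toStr, h0]

theorem pvRepL_snoc (k : Nat) : pvRepL k ++ ['0', ' '] = pvRepL (k + 1) := by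
  induction k with
  | zero => rfl
  | succ k ih => simp [pvRepL] at ih ⊢; exact ih

theorem pvRepR_from_L (m : Nat) : ' ' :: (pvRepL m ++ ['0']) = pvRepR (m + 1) := by
  induction m with
  | zero => rfl
  | succ m ih => simp [pvRepL, pvRepR] at ih ⊢; exact ih

theorem pvWrap_toList : ∀ (n : Nat) (d : Int) (s : String), d.toNat ≤ n → 0 ≤ d →
    (pvWrap s d).toList = pvRepL (d / 2).toNat ++ s.toList ++ pvRepR (d - d / 2).toNat := by
  intro n
  induction n with
  | zero =>
    intro d s hn h0
    have hd : d = 0 := by omega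
    subst hd
    rw [pvWrap]
    simp [pvRepL, pvRepR]
  | succ n ih =>
    intro d s hn h0
    by_cases hz : d ≤ 0
    · have hd : d = 0 := by omega
      subst hd
      rw [pvWrap]
      simp [pvRepL, pvRepR]
    · have hpos : 0 < d := by omega
      have hm : PySem.Int.mod d 2 = d % 2 := PySem.Int.mod_eq_emod_of_pos (by omega)
      rw [pvWrap, dif_neg hz]
      by_cases hodd : PySem.Int.mod d 2 ≠ 0
      · have h1 : d % 2 = 1 := by omega
        rw [if_pos hodd, ih (d - 1) _ (by omega) (by omega)]
        have e1 : ((d - 1) / 2).toNat = (d / 2).toNat := by omega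
        have e2 : ((d - 1) - (d - 1) / 2).toNat + 1 = (d - d / 2).toNat := by omega
        rw [e1, ← e2]
        simp [pvRepR]
      · have h1 : d % 2 = 0 := by omega
        have hd2 : 0 ≤ d - 2 := by omega
        rw [if_neg hodd, ih (d - 2) _ (by omega) hd2]
        have e1 : ((d - 2) / 2).toNat + 1 = (d / 2).toNat := by omega
        have e2 : ((d - 2) - (d - 2) / 2).toNat + 1 = (d - d / 2).toNat := by omega
        rw [← e1, ← e2, ← pvRepL_snoc]
        have hs : ("0 " ++ s ++ " 0").toList = ['0', ' '] ++ s.toList ++ [' ', '0'] := by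
          simp
        simp [hs, pvRepR]

-- A's accumulation loop plus the final last element equals the space-join of the stringified window.
theorem pv_core_join (ws : List Int) (w : Int) (acc : String) :
    ((w :: ws).dropLast.foldl (fun o s => o ++ PySem.Int.toStr s ++ " ") acc
      ++ PySem.Int.toStr ((w :: ws).getLast (by simp))).toList
    = acc.toList ++ (PySem.Str.join " " ((w :: ws).map PySem.Int.toStr)).toList := by
  induction ws generalizing w acc with
  | nil => simp [PySem.Str.toList_join, PySem.Chars.join_singleton]
  | cons v ws ih =>
    have h2 : (w :: v :: ws).dropLast = w :: (v :: ws).dropLast := rfl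
    rw [h2, List.foldl_cons, List.getLast_cons (by simp), ih]
    simp [PySem.Str.toList_join, PySem.Chars.join_cons_cons]

-- ===== VERDICT (by name: the statement is the Claim_ definition above) =====
theorem padding_symmetrically_spec : Claim_equal_padding_symmetrically := by
  intro i data start_shot end_shot biggest _ hpre
  obtain ⟨hin, hne⟩ := hpre
  unfold Spec_padding_symmetrically padding_symmetrically padding_symmetrically_alt
  simp only
  set row := (PySem.List.pyGet? data i).getD [] with hrow
  set W := PySem.List.slice row (some start_shot) (some (end_shot + 1)) with hWdef
  obtain ⟨w, ws, hWe⟩ := List.exists_cons_of_ne_nil hne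
  rw [PySem.List.slice_to_neg_one, PySem.List.pyGetD_neg_one W 0 hne]
  set core := W.dropLast.foldl (fun o s => o ++ PySem.Int.toStr s ++ " ") "" ++ PySem.Int.toStr (W.getLast hne) with hcore
  set J := PySem.Str.join " " (W.map PySem.Int.toStr) with hJ
  have hcoreL : core.toList = J.toList := by
    rw [hcore, hJ]
    simp only [hWe]
    simpa using pv_core_join ws w ""
  set diff := biggest - (end_shot - start_shot + 1) with hdiff
  by_cases hlt : end_shot - start_shot + 1 < biggest
  · simp only [if_pos hlt]
    have hd1 : 1 ≤ diff := by omega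
    have hBw : (pvWrap J diff).toList
        = pvRepL (diff / 2).toNat ++ J.toList ++ pvRepR (diff - diff / 2).toNat :=
      pvWrap_toList diff.toNat diff J le_rfl (by omega)
    have hme : PySem.Int.mod diff 2 = diff % 2 := PySem.Int.mod_eq_emod_of_pos (by omega)
    by_cases hev : PySem.Int.mod diff 2 = 0
    · have hev' : diff % 2 = 0 := by omega
      set k := PySem.Int.floordiv diff 2 with hk
      have hke : k = diff / 2 := by rw [hk, PySem.Int.floordiv_eq_ediv_of_pos (by omega)]
      simp only [if_pos hev]
      apply String.toList_inj.mp
      rw [hBw]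
      have e2 : (k - 1).toNat + 1 = (diff - diff / 2).toNat := by omega
      have h0 : PySem.Int.toChars 0 = ['0'] := by decide
      rw [← e2, ← pvRepR_from_L]
      simp [pvRep0Sp_toList, hcoreL, PySem.Int.toList_toStr, h0, hke]
    · have hod : diff % 2 = 1 := by omega
      set k := PySem.Int.floordiv (diff - 1) 2 with hk
      have hke : k = diff / 2 := by
        rw [hk, PySem.Int.floordiv_eq_ediv_of_pos (by omega)]; omega
      simp only [if_neg hev]
      apply String.toList_inj.mp
      rw [hBw]
      have e2 : k.toNat + 1 = (diff - diff / 2).toNat := by omega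
      have h0 : PySem.Int.toChars 0 = ['0'] := by decide
      rw [← e2, ← pvRepR_from_L]
      simp [pvRep0Sp_toList, hcoreL, PySem.Int.toList_toStr, h0, hke]
  · simp only [if_neg hlt]
    have hd0 : diff ≤ 0 := by omega
    rw [pvWrap, dif_pos hd0]
    exact String.toList_inj.mp hcoreL
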